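-- pv_equiv track=rewrite | github.com/stevenvillarino/margo-agent | slack_bot.py | _parse_command_args
-- ===== SOURCE A (Python) =====
-- from typing import Dict, List, Any, Optional
--
-- def _parse_command_args(text: str) -> Dict[str, str]:
--     """Parse command arguments from text."""
--     args = {}
--
--     if not text:
--         return args
--
--     # Simple parsing - can be enhanced
--     parts = text.split()
--
--     for i, part in enumerate(parts):
--         if part.startswith('--'):
--             key = part[2:]
--             value = parts[i + 1] if i + 1 < len(parts) and not parts[i + 1].startswith('--') else True
--             args[key] = value
--
--     return args
-- ===== SOURCE B (Python) =====
-- def _parse_command_args(text: str):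
--     """Parse command arguments from text."""
--     args = {}
--     if not text:
--         return args
--     parts = text.split()
--     n = len(parts)
--     i = 0
--     while i < n:
--         tok = parts[i]
--         if tok.startswith('--'):
--             key = tok[2:]
--             if i + 1 < n and not parts[i + 1].startswith('--'):
--                 args[key] = parts[i + 1]
--                 i += 2
--             else:
--                 args[key] = True
--                 i += 1
--         else:
--             i += 1
--     return args
-- ===== Notes on version B (the rewrite author's own statement) =====
-- stated objective: alternative
-- what changed: Replaced the enumerate-with-lookahead scan (which revisits value tokens) by a cursor-driven while loop that consumes a flag and its value together, advancing by 2 past consumed values so no token is visited twice.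
-- outside the precondition, e.g. on _parse_command_args('--v'): A returns {'v': True}, B returns {'v': True}; on _parse_command_args('--'): A returns {'': True}, B returns {'': True}
import Mathlib
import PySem

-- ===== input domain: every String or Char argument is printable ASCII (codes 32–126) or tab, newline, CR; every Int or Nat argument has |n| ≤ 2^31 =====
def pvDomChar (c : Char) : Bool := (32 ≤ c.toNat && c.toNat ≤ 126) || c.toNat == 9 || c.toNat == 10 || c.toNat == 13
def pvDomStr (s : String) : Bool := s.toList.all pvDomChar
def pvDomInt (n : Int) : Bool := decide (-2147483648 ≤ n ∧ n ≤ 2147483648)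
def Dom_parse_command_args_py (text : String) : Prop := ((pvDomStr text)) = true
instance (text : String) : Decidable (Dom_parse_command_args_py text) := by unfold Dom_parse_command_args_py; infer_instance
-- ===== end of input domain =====

-- B replaces A's enumerate-with-lookahead scan by a cursor loop that consumes a flag together
-- with its value token (advancing by 2), never revisiting consumed tokens; same dict, same order.
-- Equivalence is about the RETURN value; neither program mutates its argument.

-- ===== PORT A =====
-- Python stores the bool True when a flag has no following value; dict[str,str] cannot hold a
-- bool, so Pre_ excludes those inputs and "True" here is a placeholder reached only outside Pre_.
def parse_command_args_py (text : String) : List (String × String) :=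
  let args : PySem.Dict String String := PySem.Dict.empty
  if text = "" then args.items
  else
    let parts := PySem.Str.split₀ text
    let args := (PySem.List.enumerate parts).foldl
      (fun (d : PySem.Dict String String) (p : Int × String) =>
        if PySem.Str.startswith p.2 "--" then
          let key := PySem.Str.slice p.2 (some 2) none
          if p.1 + 1 < (parts.length : Int) ∧
             ¬ (PySem.Str.startswith (PySem.List.pyGetD parts (p.1 + 1) "") "--" = true) then
            d.insert key (PySem.List.pyGetD parts (p.1 + 1) "")
          else
            d.insert key "True"   -- placeholder for Python's True; outside Pre_
        else d) args
    args.items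

-- ===== PORT B =====
-- same placeholder remark as in port A: the True branch lies outside Pre_.
def pvGoB (parts : List String) (i : Nat) (args : PySem.Dict String String) :
    PySem.Dict String String :=
  if h : i < parts.length then
    let tok := parts[i]
    if PySem.Str.startswith tok "--" then
      let key := PySem.Str.slice tok (some 2) none
      if i + 1 < parts.length ∧
          ¬ (PySem.Str.startswith (parts.getD (i + 1) "") "--" = true) then
        pvGoB parts (i + 2) (args.insert key (parts.getD (i + 1) ""))
      else
        pvGoB parts (i + 1) (args.insert key "True")
    else pvGoB parts (i + 1) args
  else args
termination_by parts.length - i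

def parse_command_args_py_alt (text : String) : List (String × String) :=
  let args : PySem.Dict String String := PySem.Dict.empty
  if text = "" then args.items
  else (pvGoB (PySem.Str.split₀ text) 0 args).items

-- ===== PRECONDITION & SPEC =====
-- Pre_ excludes texts in which some '--' token is not followed by a plain value token: there
-- Python A returns a dict holding the bool True, which is not a value of the declared str type.
def Pre_parse_command_args_py (text : String) : Prop :=
  ∀ k, k < (PySem.Str.split₀ text).length →
    PySem.Str.startswith ((PySem.Str.split₀ text).getD k "") "--" = true →
      k + 1 < (PySem.Str.split₀ text).length ∧
      ¬ (PySem.Str.startswith ((PySem.Str.split₀ text).getD (k + 1) "") "--" = true)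
instance (text : String) : Decidable (Pre_parse_command_args_py text) := by
  unfold Pre_parse_command_args_py; infer_instance

def pvWitness_parse_command_args_py : String := "--name margo --count 3"

def Spec_parse_command_args_py (text : String) (out : List (String × String)) : Prop := out = parse_command_args_py_alt text
instance (text : String) (out : List (String × String)) : Decidable (Spec_parse_command_args_py text out) := by unfold Spec_parse_command_args_py; infer_instance

-- ===== CLAIM (what is proved, stated in full; the proofs are below) =====
def Claim_equal_parse_command_args_py : Prop := ∀ (text : String), Dom_parse_command_args_py text → Pre_parse_command_args_py text → Spec_parse_command_args_py text (parse_command_args_py text)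

-- ===== LEMMAS AND PROOFS =====

-- A's loop over the enumerate suffix starting at i equals B's cursor loop from i,
-- provided every '--' token is followed by a non-flag value token.
theorem pvMain (parts : List String)
    (hp : ∀ k, k < parts.length →
      PySem.Str.startswith (parts.getD k "") "--" = true →
        k + 1 < parts.length ∧
        ¬ (PySem.Str.startswith (parts.getD (k + 1) "") "--" = true)) :
    ∀ m i (d : PySem.Dict String String), parts.length - i ≤ m →
      (PySem.List.enumerate (parts.drop i) (i : Int)).foldl
        (fun (d : PySem.Dict String String) (p : Int × String) =>
          if PySem.Str.startswith p.2 "--" then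
            let key := PySem.Str.slice p.2 (some 2) none
            if p.1 + 1 < (parts.length : Int) ∧
               ¬ (PySem.Str.startswith (PySem.List.pyGetD parts (p.1 + 1) "") "--" = true) then
              d.insert key (PySem.List.pyGetD parts (p.1 + 1) "")
            else d.insert key "True"
          else d) d
      = pvGoB parts i d := by
  intro m
  induction m with
  | zero =>
    intro i d hle
    have hi : parts.length ≤ i := by omega
    rw [List.drop_eq_nil_of_le hi, PySem.List.enumerate_nil, List.foldl_nil, pvGoB]
    simp [Nat.not_lt.2 hi]
  | succ m ih =>
    intro i d hle
    by_cases hi : i < parts.length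
    · rw [List.drop_eq_getElem_cons hi, PySem.List.enumerate_cons, List.foldl_cons]
      by_cases hf : PySem.Str.startswith parts[i] "--" = true
      · obtain ⟨h1, h2⟩ := hp i hi (by rwa [List.getD_eq_getElem parts "" hi])
        have hcast : (i : Int) + 1 = ((i + 1 : Nat) : Int) := by push_cast; ring
        have hget : PySem.List.pyGetD parts ((i : Int) + 1) "" = parts.getD (i + 1) "" := by
          rw [hcast, PySem.List.pyGetD_natCast]
        have hcond : ((i : Int) + 1 < (parts.length : Int) ∧
            ¬ (PySem.Str.startswith (PySem.List.pyGetD parts ((i : Int) + 1) "") "--" = true)) := by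
          refine ⟨by exact_mod_cast h1, by rw [hget]; exact h2⟩
        simp only [hf, hcond, if_pos, hget]
        rw [List.drop_eq_getElem_cons h1, PySem.List.enumerate_cons, List.foldl_cons]
        have h2' : PySem.Str.startswith parts[i + 1] "--" = false := by
          rw [List.getD_eq_getElem parts "" h1] at h2
          exact Bool.not_eq_true _ ▸ (by simpa using h2)
        simp only [h2', Bool.false_eq_true, if_false]
        have hcast2 : (i : Int) + 1 + 1 = ((i + 2 : Nat) : Int) := by push_cast; ring
        rw [hcast2, ih (i + 2) _ (by omega)]
        conv_rhs => rw [pvGoB]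
        simp only [dif_pos hi, hf, if_true]
        rw [if_pos (show i + 1 < parts.length ∧
          ¬PySem.Str.startswith (parts.getD (i + 1) "") "--" = true from ⟨h1, h2⟩)]
        have h2c : PySem.Chars.startswith (parts[i + 1]'h1).toList ['-', '-'] = false := by
          simpa using h2'
        simp [List.getElem?_eq_getElem h1, h2c]
      · simp only [hf, Bool.false_eq_true, if_false]
        have hcast : (i : Int) + 1 = ((i + 1 : Nat) : Int) := by push_cast; ring
        rw [hcast, ih (i + 1) d (by omega)]
        conv_rhs => rw [pvGoB]
        simp only [dif_pos hi]
        rw [if_neg hf]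
    · have hge : parts.length ≤ i := by omega
      rw [List.drop_eq_nil_of_le hge, PySem.List.enumerate_nil, List.foldl_nil, pvGoB]
      simp [Nat.not_lt.2 hge]

-- ===== VERDICT (by name: the statement is the Claim_ definition above) =====
theorem parse_command_args_py_spec : Claim_equal_parse_command_args_py := by
  intro text _ hpre
  unfold Spec_parse_command_args_py parse_command_args_py parse_command_args_py_alt
  by_cases h : text = ""
  · simp [h]
  · simp only [h, if_false]
    have := pvMain (PySem.Str.split₀ text) hpre (PySem.Str.split₀ text).length 0 PySem.Dict.empty (by omega)
    simpa using congrArg PySem.Dict.items this
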